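-- pv_equiv track=rewrite | github.com/lee-fuhr/total-rekall | src/retrieval_forgetting.py | _compute_neglected
-- ===== SOURCE A (Python) =====
-- def _compute_neglected(counts: dict[str, int]) -> list[str]:
--     """
--     Return memory IDs in the bottom 50% of retrieval count.
--
--     If all counts are equal, returns empty list (no one is neglected).
--     Memories with zero retrievals are always considered neglected
--     when other memories have retrievals.
--     """
--     if not counts:
--         return []
--
--     values = list(counts.values())
--     total = sum(values)
--
--     # If nothing has been retrieved, everything is equally neglected
--     if total == 0:
--         return list(counts.keys())
--
--     # If all equal, none are neglected
--     if len(set(values)) == 1: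
--         return []
--
--     # Sort by count ascending
--     sorted_items = sorted(counts.items(), key=lambda x: x[1])
--     median_idx = len(sorted_items) // 2
--
--     # Bottom 50%: memories with counts strictly below the median value
--     median_value = sorted_items[median_idx][1]
--     neglected = [mid for mid, cnt in sorted_items if cnt < median_value]
--     return neglected
-- ===== SOURCE B (Python) =====
-- def _compute_neglected(counts: dict[str, int]) -> list[str]:
--     if not counts:
--         return []
--     if sum(counts.values()) == 0:
--         return list(counts.keys())
--     # Bucket the IDs by count (one pass), then walk the distinct counts in
--     # ascending order accumulating bucket sizes: every bucket fully contained
--     # in the first len(counts)//2 positions lies strictly below the median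
--     # value, so its IDs are neglected; stop at the bucket that straddles or
--     # reaches the median index.
--     groups: dict[int, list[str]] = {}
--     for mid, cnt in counts.items():
--         groups.setdefault(cnt, []).append(mid)
--     k = len(counts) // 2
--     neglected: list[str] = []
--     seen = 0
--     for v in sorted(groups):
--         bucket = groups[v]
--         if seen + len(bucket) > k:
--             break
--         neglected.extend(bucket)
--         seen += len(bucket)
--     return neglected
-- ===== Notes on version B (the rewrite author's own statement) =====
-- stated objective: alternative
-- what changed: B replaces A's sort-all-items-then-index-median-then-filter with a bucket approach: it groups IDs by count in one dict pass, then walks the distinct counts in ascending order accumulating bucket sizes, emitting every bucket that fits entirely before the median index n//2 and stopping at the straddling bucket, so the full item list is never sorted and no median value is ever compared against items.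
import Mathlib
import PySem

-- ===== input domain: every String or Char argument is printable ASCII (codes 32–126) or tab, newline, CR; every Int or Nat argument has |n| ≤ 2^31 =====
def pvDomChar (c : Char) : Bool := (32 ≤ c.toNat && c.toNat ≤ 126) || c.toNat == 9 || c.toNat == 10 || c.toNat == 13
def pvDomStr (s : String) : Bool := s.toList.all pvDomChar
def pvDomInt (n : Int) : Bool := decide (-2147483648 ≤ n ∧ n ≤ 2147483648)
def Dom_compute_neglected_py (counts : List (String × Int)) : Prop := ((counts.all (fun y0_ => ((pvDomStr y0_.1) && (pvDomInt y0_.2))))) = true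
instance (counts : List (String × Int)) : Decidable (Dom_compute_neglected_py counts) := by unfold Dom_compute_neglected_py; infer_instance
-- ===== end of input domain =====

-- B buckets the IDs by count in one dict pass, then walks the distinct counts ascending,
-- accumulating bucket sizes and emitting every bucket that fits before index n//2, instead
-- of sorting all items and filtering against the indexed median (objective: alternative).

-- ===== PORT A =====
def compute_neglected_py (counts : List (String × Int)) : List String :=
  if counts = [] then []
  else
    let values := counts.map (fun p => p.2)
    let total := values.sum
    if total = 0 then counts.map (fun p => p.1)
    else if (PySem.Set.ofList values).length = 1 then []
    else
      let sorted_items := PySem.List.sorted counts (fun p => p.2) false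
      let median_idx : Nat := sorted_items.length / 2
      -- sorted_items[median_idx]: always in range (counts ≠ []), so the default is never used
      let median_value := (PySem.List.pyGetD sorted_items (median_idx : Int) ("", 0)).2
      (sorted_items.filter (fun p => decide (p.2 < median_value))).map (fun p => p.1)

-- ===== PORT B =====
-- the 'for v in sorted(groups): … break …' loop of Source B, with its (neglected, seen) state
def pvAltLoop (g : PySem.Dict Int (List String)) (k : Nat) :
    List Int → List String → Nat → List String
  | [], res, _ => res
  | v :: vs, res, seen =>
      let bucket := PySem.Dict.getD g v []
      if seen + bucket.length > k then res
      else pvAltLoop g k vs (res ++ bucket) (seen + bucket.length)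

def compute_neglected_py_alt (counts : List (String × Int)) : List String :=
  if counts = [] then []
  else if (counts.map (fun p => p.2)).sum = 0 then counts.map (fun p => p.1)
  else
    let groups := counts.foldl
      (fun d p => d.modify p.2 [] (fun l => l ++ [p.1])) PySem.Dict.empty
    let k : Nat := counts.length / 2
    pvAltLoop groups k (PySem.List.sorted (PySem.Dict.keys groups) (fun v => v) false) [] 0

-- ===== PRECONDITION & SPEC =====
def Spec_compute_neglected_py (counts : List (String × Int)) (out : List String) : Prop := out = compute_neglected_py_alt counts
instance (counts : List (String × Int)) (out : List String) : Decidable (Spec_compute_neglected_py counts out) := by unfold Spec_compute_neglected_py; infer_instance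

-- ===== CLAIM =====
def Claim_equal_compute_neglected_py : Prop := ∀ (counts : List (String × Int)), Dom_compute_neglected_py counts → Spec_compute_neglected_py counts (compute_neglected_py counts)

-- ===== LEMMAS AND PROOFS =====

-- membership in a (·.2 == v)-filter forces the second component
theorem pv_snd_of_mem_filter (counts : List (String × Int)) (v : Int)
    (p : String × Int) (hp : p ∈ counts.filter (fun q => q.2 == v)) : p.2 = v := by
  have := (List.mem_filter.mp hp).2
  exact beq_iff_eq.mp this

-- insertBy puts x in front when it precedes the head (or the list is empty)
theorem pv_insert_front (x : String × Int) (s : List (String × Int))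
    (h : ∀ z ∈ s.head?, x.2 < z.2) :
    PySem.List.insertBy (fun a b => decide (a.2 < b.2)) x s = x :: s := by
  cases s with
  | nil => rfl
  | cons y ys =>
    have := h y rfl
    simp [PySem.List.insertBy, this]

-- insertBy passes over a block it does not precede
theorem pv_insertBy_append (x : String × Int) (l1 l2 : List (String × Int))
    (h : ∀ y ∈ l1, ¬ x.2 < y.2) :
    PySem.List.insertBy (fun a b => decide (a.2 < b.2)) x (l1 ++ l2) =
      l1 ++ PySem.List.insertBy (fun a b => decide (a.2 < b.2)) x l2 := by
  induction l1 with
  | nil => rfl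
  | cons y ys ih =>
    have hy : ¬ x.2 < y.2 := h y (List.mem_cons_self ..)
    simp only [List.cons_append, PySem.List.insertBy, hy, decide_false]
    rw [ih (fun z hz => h z (List.mem_cons_of_mem _ hz))]
    simp

theorem pv_sorted_append_singleton (xs : List (String × Int)) (x : String × Int) :
    PySem.List.sorted (xs ++ [x]) (fun p => p.2) false =
      PySem.List.insertBy (fun a b => decide (a.2 < b.2)) x
        (PySem.List.sorted xs (fun p => p.2) false) := by
  rw [PySem.List.sorted_eq_foldl_insertBy, PySem.List.sorted_eq_foldl_insertBy, List.foldl_append]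
  rfl

-- the stable sort peels off its minimal-key block in input order
theorem pv_sorted_min_split (v : Int) (counts : List (String × Int))
    (hmin : ∀ p ∈ counts, v ≤ p.2) :
    PySem.List.sorted counts (fun p => p.2) false =
      counts.filter (fun p => p.2 == v) ++
        PySem.List.sorted (counts.filter (fun p => p.2 != v)) (fun p => p.2) false := by
  induction counts using List.reverseRecOn with
  | nil => rfl
  | append_singleton xs x ih =>
    have hminxs : ∀ p ∈ xs, v ≤ p.2 := fun p hp => hmin p (List.mem_append_left _ hp)
    have hvx : v ≤ x.2 := hmin x (List.mem_append_right _ (List.mem_singleton_self x))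
    rw [pv_sorted_append_singleton, ih hminxs, List.filter_append, List.filter_append]
    by_cases hx : x.2 = v
    · have h1 : ∀ y ∈ xs.filter (fun p => p.2 == v), ¬ x.2 < y.2 := by
        intro y hy
        rw [pv_snd_of_mem_filter xs v y hy, hx]
        exact lt_irrefl v
      rw [pv_insertBy_append _ _ _ h1]
      have h2 : PySem.List.insertBy (fun a b => decide (a.2 < b.2)) x
          (PySem.List.sorted (xs.filter (fun p => p.2 != v)) (fun p => p.2) false) =
          x :: PySem.List.sorted (xs.filter (fun p => p.2 != v)) (fun p => p.2) false := by
        apply pv_insert_front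
        intro z hz
        have hmem := List.mem_of_mem_head? hz
        have hzs := (PySem.List.mem_sorted _ _ _ _).mp hmem
        have hzne : z.2 ≠ v := by
          have := (List.mem_filter.mp hzs).2
          simpa using this
        have hzge : v ≤ z.2 := hminxs z (List.mem_of_mem_filter hzs)
        rw [hx]
        exact lt_of_le_of_ne hzge (Ne.symm hzne)
      rw [h2]
      simp [hx]
    · have hvlt : v < x.2 := lt_of_le_of_ne hvx (Ne.symm hx)
      have h1 : ∀ y ∈ xs.filter (fun p => p.2 == v), ¬ x.2 < y.2 := by
        intro y hy
        rw [pv_snd_of_mem_filter xs v y hy]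
        exact not_lt_of_gt hvlt
      rw [pv_insertBy_append _ _ _ h1, ← pv_sorted_append_singleton]
      have hfx : (x.2 == v) = false := by simpa using hx
      have hfx' : (x.2 != v) = true := by simpa using hx
      simp [hfx, hfx']

-- bucket decomposition of the stable sort along any strictly increasing cover of the keys
theorem pv_decomp (vs : List Int) (counts : List (String × Int))
    (hvs : vs.Pairwise (· < ·)) (hcov : ∀ p ∈ counts, p.2 ∈ vs) :
    PySem.List.sorted counts (fun p => p.2) false =
      vs.flatMap (fun v => counts.filter (fun p => p.2 == v)) := by
  induction vs generalizing counts with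
  | nil =>
    have : counts = [] := by
      cases counts with
      | nil => rfl
      | cons p ps => exact absurd (hcov p (List.mem_cons_self ..)) (List.not_mem_nil)
    subst this; rfl
  | cons v vs ih =>
    rcases List.pairwise_cons.mp hvs with ⟨hv, hvs'⟩
    have hmin : ∀ p ∈ counts, v ≤ p.2 := by
      intro p hp
      rcases List.mem_cons.mp (hcov p hp) with h | h
      · exact le_of_eq h.symm
      · exact le_of_lt (hv _ h)
    rw [pv_sorted_min_split v counts hmin]
    have hcov' : ∀ p ∈ counts.filter (fun q => q.2 != v), p.2 ∈ vs := by
      intro p hp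
      rcases List.mem_filter.mp hp with ⟨hmem, hne⟩
      rcases List.mem_cons.mp (hcov p hmem) with h | h
      · exact absurd h (by simpa using hne)
      · exact h
    rw [ih _ hvs' hcov']
    rw [List.flatMap_cons]
    congr 1
    apply List.flatMap_congr
    intro w hw
    rw [List.filter_filter]
    apply List.filter_congr
    intro a _
    by_cases haw : a.2 = w
    · have hwv : ¬ w = v := ne_of_gt (hv w hw)
      simp [haw, hwv]
    · simp [haw]

-- the bucket dict of B: lookup gives the IDs with that count, in insertion order
theorem pv_groups_getD (counts : List (String × Int)) (v : Int) :
    (counts.foldl (fun d p => d.modify p.2 [] (fun l => l ++ [p.1]))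
        PySem.Dict.empty).getD v [] =
      (counts.filter (fun p => p.2 == v)).map (fun p => p.1) := by
  have h := PySem.Dict.getD_foldl_modify_append
    (counts.map (fun p => (p.2, p.1))) (PySem.Dict.empty) v
  rw [List.foldl_map] at h
  simpa [List.filter_map, Function.comp] using h

-- the bucket dict's keys are the distinct counts in first-occurrence order
theorem pv_groups_keys (counts : List (String × Int)) :
    (counts.foldl (fun d p => d.modify p.2 [] (fun l => l ++ [p.1]))
        PySem.Dict.empty).keys =
      PySem.Set.ofList (counts.map (fun p => p.2)) := by
  rw [PySem.Dict.keys_foldl_modify_key counts (fun p => p.2) [] (fun _ p l => l ++ [p.1])]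
  rw [PySem.Dict.keys_empty]
  exact PySem.Set.update_empty _

-- filtering a bucketed flatMap below a threshold keeps exactly the whole low buckets
theorem pv_filter_flatMap (vs : List Int) (counts : List (String × Int)) (m : Int) :
    (vs.flatMap (fun v => counts.filter (fun p => p.2 == v))).filter
        (fun p => decide (p.2 < m)) =
      (vs.filter (fun v => decide (v < m))).flatMap
        (fun v => counts.filter (fun p => p.2 == v)) := by
  induction vs with
  | nil => rfl
  | cons v vs ih =>
    rw [List.flatMap_cons, List.filter_append, ih, List.filter_cons]
    by_cases hv : v < m
    · have : (counts.filter (fun p => p.2 == v)).filter (fun p => decide (p.2 < m)) =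
          counts.filter (fun p => p.2 == v) := by
        apply List.filter_eq_self.mpr
        intro p hp
        rw [pv_snd_of_mem_filter counts v p hp]
        simpa using hv
      simp [hv, this]
    · have : (counts.filter (fun p => p.2 == v)).filter (fun p => decide (p.2 < m)) = [] := by
        apply List.filter_eq_nil_iff.mpr
        intro p hp
        rw [pv_snd_of_mem_filter counts v p hp]
        simpa using hv
      simp [hv, this]

-- B's loop collects exactly the buckets strictly below the value at flat index k - seen
theorem pv_loop (counts : List (String × Int)) (k : Nat) (vs : List Int)
    (res : List String) (seen : Nat)
    (hvs : vs.Pairwise (· < ·)) (hseen : seen ≤ k)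
    (hk : k - seen < (vs.flatMap (fun v => counts.filter (fun p => p.2 == v))).length) :
    pvAltLoop (counts.foldl (fun d p => d.modify p.2 [] (fun l => l ++ [p.1]))
        PySem.Dict.empty) k vs res seen =
      res ++ (vs.filter (fun v => decide (v <
          ((vs.flatMap (fun v => counts.filter (fun p => p.2 == v))).getD (k - seen)
            ("", 0)).2))).flatMap
        (fun v => (counts.filter (fun p => p.2 == v)).map (fun p => p.1)) := by
  induction vs generalizing res seen with
  | nil => simp at hk
  | cons v vs ih =>
    rcases List.pairwise_cons.mp hvs with ⟨hv, hvs'⟩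
    rw [List.flatMap_cons] at hk ⊢
    set C := counts.filter (fun p => p.2 == v) with hC
    show pvAltLoop _ k (v :: vs) res seen = _
    rw [pvAltLoop]
    rw [pv_groups_getD counts v, ← hC]
    simp only [List.length_map]
    by_cases hstop : seen + C.length > k
    · -- the straddling bucket: the median value is v, nothing more is emitted
      have hlt : k - seen < C.length := by omega
      have hget : ((C ++ vs.flatMap (fun v => counts.filter (fun p => p.2 == v))).getD
          (k - seen) ("", 0)).2 = v := by
        rw [List.getD_eq_getElem _ _ (by simpa using hk), List.getElem_append_left hlt]
        exact pv_snd_of_mem_filter counts v _ (List.getElem_mem hlt)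
      rw [if_pos hstop, hget]
      have hfilt : (v :: vs).filter (fun w => decide (w < v)) = [] := by
        rw [List.filter_eq_nil_iff]
        intro w hw
        rcases List.mem_cons.mp hw with rfl | hmem
        · simp
        · simpa using not_lt_of_gt (hv w hmem)
      rw [hfilt]
      simp
    · -- a fully-low bucket: emit it and continue
      rw [if_neg hstop]
      have hle : C.length ≤ k - seen := by omega
      have hget : ((C ++ vs.flatMap (fun v => counts.filter (fun p => p.2 == v))).getD
          (k - seen) ("", 0)) =
          ((vs.flatMap (fun v => counts.filter (fun p => p.2 == v))).getD
            (k - (seen + C.length)) ("", 0)) := by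
        rw [List.getD_eq_getElem _ _ (by simpa using hk),
            List.getElem_append_right hle,
            List.getD_eq_getElem _ _ (by simp at hk ⊢; omega)]
        congr 1
        omega
      have hk' : k - (seen + C.length) <
          (vs.flatMap (fun v => counts.filter (fun p => p.2 == v))).length := by
        simp at hk ⊢; omega
      rw [ih (res ++ C.map (fun p => p.1)) (seen + C.length) hvs' (by omega) hk']
      have hm : v < ((vs.flatMap (fun v => counts.filter (fun p => p.2 == v))).getD
          (k - (seen + C.length)) ("", 0)).2 := by
        have hmem : (vs.flatMap (fun v => counts.filter (fun p => p.2 == v))).getD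
            (k - (seen + C.length)) ("", 0) ∈
            vs.flatMap (fun v => counts.filter (fun p => p.2 == v)) := by
          rw [List.getD_eq_getElem _ _ hk']
          exact List.getElem_mem hk'
        rcases List.mem_flatMap.mp hmem with ⟨w, hw, hpw⟩
        rw [pv_snd_of_mem_filter counts w _ hpw]
        exact hv w hw
      rw [hget, List.filter_cons, if_pos (by simpa using hm), List.flatMap_cons]
      simp [hC]

-- ===== VERDICT =====
theorem compute_neglected_py_spec : Claim_equal_compute_neglected_py := by
  intro counts _
  show compute_neglected_py counts = compute_neglected_py_alt counts
  unfold compute_neglected_py compute_neglected_py_alt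
  by_cases hnil : counts = []
  · simp [hnil]
  · simp only [hnil, if_false]
    by_cases htot : (counts.map (fun p => p.2)).sum = 0
    · simp [htot]
    · simp only [htot, if_false]
      rw [pv_groups_keys counts]
      set vs := PySem.List.sorted (PySem.Set.ofList (counts.map (fun p => p.2)))
        (fun v => v) false with hvsdef
      have hvsp : vs.Pairwise (· < ·) := PySem.List.sorted_ofList_pairwise_lt _
      have hcov : ∀ p ∈ counts, p.2 ∈ vs := by
        intro p hp
        rw [hvsdef, PySem.List.mem_sorted, PySem.Set.mem_ofList]
        exact List.mem_map_of_mem hp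
      have hdec : PySem.List.sorted counts (fun p => p.2) false =
          vs.flatMap (fun v => counts.filter (fun p => p.2 == v)) :=
        pv_decomp vs counts hvsp hcov
      have hlenflat : (vs.flatMap (fun v => counts.filter (fun p => p.2 == v))).length
          = counts.length := by
        rw [← hdec, PySem.List.length_sorted]
      have hpos : 0 < counts.length := List.length_pos_iff.mpr hnil
      have hkb : counts.length / 2 < counts.length := Nat.div_lt_self hpos (by norm_num)
      have hloop := pv_loop counts (counts.length / 2) vs [] 0 hvsp (Nat.zero_le _)
        (by rw [hlenflat]; simpa using hkb)
      rw [Nat.sub_zero] at hloop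
      rw [hloop, List.nil_append]
      set m := ((vs.flatMap (fun v => counts.filter (fun p => p.2 == v))).getD
        (counts.length / 2) ("", 0)).2 with hmdef
      by_cases hset : (PySem.Set.ofList (counts.map (fun p => p.2))).length = 1
      · -- A's all-equal branch: the single bucket contains everything, B's filter is empty
        simp only [hset, if_true]
        obtain ⟨c, hc⟩ : ∃ c, PySem.Set.ofList (counts.map (fun p => p.2)) = [c] :=
          List.length_eq_one_iff.mp hset
        have hvs1 : vs = [c] := by rw [hvsdef, hc]; rfl
        have hmc : m = c := by
          have hkb' : counts.length / 2 <
              (vs.flatMap (fun v => counts.filter (fun p => p.2 == v))).length := by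
            rw [hlenflat]; exact hkb
          rw [hmdef, List.getD_eq_getElem _ _ hkb']
          rcases List.mem_flatMap.mp (List.getElem_mem hkb') with ⟨w, hw, hpw⟩
          rw [hvs1] at hw
          rw [pv_snd_of_mem_filter counts w _ hpw]
          simpa using hw
        rw [hvs1, hmc]
        simp
      · simp only [hset, if_false]
        have hklen : (PySem.List.sorted counts (fun p => p.2) false).length / 2 =
            counts.length / 2 := by rw [PySem.List.length_sorted]
        have hma : (PySem.List.pyGetD (PySem.List.sorted counts (fun p => p.2) false)
            (((PySem.List.sorted counts (fun p => p.2) false).length / 2 : Nat) : Int)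
            ("", 0)).2 = m := by
          rw [PySem.List.pyGetD_natCast, hklen, hdec, hmdef]
        rw [hma, hdec, pv_filter_flatMap, List.map_flatMap]
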